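-- pv_equiv track=rewrite | github.com/pypi-data/pypi-mirror-391 | packages/cellarc/cellarc-0.1.1.tar.gz/cellarc-0.1.1/scripts/plots/export_dataset_stats_table.py | _format_family_label
-- ===== SOURCE A (Python) =====
-- from typing import Callable, Dict, Iterable, List, Optional
--
-- def _format_family_label(name: object) -> object:
--     if not isinstance(name, str):
--         return name
--     cleaned = name.strip().replace("_", " ")
--     tokens = cleaned.split()
--     if not tokens:
--         return "Unknown"
--     result: List[str] = []
--     i = 0
--     while i < len(tokens):
--         token = tokens[i].lower()
--         next_token = tokens[i + 1].lower() if i + 1 < len(tokens) else None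
--         if token == "mod" and next_token in {"k", "(k)"}:
--             result.append("mod(k)")
--             i += 2
--             continue
--         if token.endswith("(k)"):
--             result.append(token)
--         elif token in {"ca", "io"}:
--             result.append(token.upper())
--         else:
--             result.append(token.capitalize())
--         i += 1
--     return " ".join(result)
-- ===== SOURCE B (Python) =====
-- from typing import List, Optional
--
-- def _format_family_label(name: object) -> object:
--     if not isinstance(name, str):
--         return name
--     tokens = name.strip().replace("_", " ").split()
--     if not tokens:
--         return "Unknown"
--     # pass 1: state-machine fold carrying one pending (lower-cased) token;
--     # a pending 'mod' absorbs a following 'k'/'(k)' into 'mod(k)'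
--     merged: List[str] = []
--     pending: Optional[str] = None
--     for raw in tokens:
--         tok = raw.lower()
--         if pending == "mod" and tok in ("k", "(k)"):
--             merged.append("mod(k)")
--             pending = None
--         else:
--             if pending is not None:
--                 merged.append(pending)
--             pending = tok
--     if pending is not None:
--         merged.append(pending)
--     # pass 2: format each merged token independently
--     return " ".join(
--         t if t.endswith("(k)") else t.upper() if t in ("ca", "io") else t.capitalize()
--         for t in merged
--     )
-- ===== Notes on version B (the rewrite author's own statement) =====
-- stated objective: alternative
-- what changed: A's index-walk with explicit i+1 lookahead that merges and formats in one interleaved loop is replaced by a lookahead-free state-machine fold (carrying one pending lower-cased token that a following 'k'/'(k)' can absorb into 'mod(k)') followed by a separate per-token format map.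
import Mathlib
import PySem

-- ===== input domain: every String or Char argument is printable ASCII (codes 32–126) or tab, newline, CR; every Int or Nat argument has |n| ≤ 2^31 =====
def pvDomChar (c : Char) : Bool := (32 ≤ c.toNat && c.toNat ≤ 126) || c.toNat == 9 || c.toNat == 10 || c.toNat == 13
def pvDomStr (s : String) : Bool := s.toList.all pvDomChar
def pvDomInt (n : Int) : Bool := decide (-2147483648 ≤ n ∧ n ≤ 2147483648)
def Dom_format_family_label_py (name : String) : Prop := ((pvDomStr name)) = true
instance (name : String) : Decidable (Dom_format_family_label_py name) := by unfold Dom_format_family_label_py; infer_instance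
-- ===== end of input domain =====

-- B replaces A's index-walk with i+1 lookahead by a lookahead-free state-machine fold (one
-- pending token, absorbed by a following 'k'/'(k)') plus a separate per-token format map
-- (objective: alternative decomposition, same cost).

-- str.capitalize() on the ASCII domain: first char upper-cased, rest lower-cased (exact here)
def pvCapitalize (cs : List Char) : List Char :=
  match cs with
  | [] => []
  | c :: r => PySem.Chars.upperChar c :: PySem.Chars.lower r

-- ===== PORT A =====
-- A's while-loop over an index i, with the i+1 lookahead, as structural recursion on the token list
def pvLoopA : List (List Char) → List (List Char)
  | [] => []
  | t :: rest =>
    match rest with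
    | n :: rest' =>
      if PySem.Chars.lower t = "mod".toList ∧
          (PySem.Chars.lower n = "k".toList ∨ PySem.Chars.lower n = "(k)".toList) then
        "mod(k)".toList :: pvLoopA rest'
      else if PySem.Chars.endswith (PySem.Chars.lower t) "(k)".toList then
        PySem.Chars.lower t :: pvLoopA (n :: rest')
      else if PySem.Chars.lower t = "ca".toList ∨ PySem.Chars.lower t = "io".toList then
        PySem.Chars.upper (PySem.Chars.lower t) :: pvLoopA (n :: rest')
      else pvCapitalize (PySem.Chars.lower t) :: pvLoopA (n :: rest')
    | [] =>
      if PySem.Chars.endswith (PySem.Chars.lower t) "(k)".toList then [PySem.Chars.lower t]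
      else if PySem.Chars.lower t = "ca".toList ∨ PySem.Chars.lower t = "io".toList then
        [PySem.Chars.upper (PySem.Chars.lower t)]
      else [pvCapitalize (PySem.Chars.lower t)]

def format_family_label_py (name : String) : String :=
  let cleaned := PySem.Chars.replace (PySem.Chars.strip name.toList) "_".toList " ".toList
  let tokens := PySem.Chars.split₀ cleaned
  if tokens = [] then "Unknown"
  else String.ofList (PySem.Chars.join " ".toList (pvLoopA tokens))

-- ===== PORT B =====
-- one step of B's fold: state = (merged-so-far reversed, pending lower-cased token)
def pvStepB (s : List (List Char) × Option (List Char)) (raw : List Char) :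
    List (List Char) × Option (List Char) :=
  let tok := PySem.Chars.lower raw
  match s.2 with
  | some p =>
    if p = "mod".toList ∧ (tok = "k".toList ∨ tok = "(k)".toList) then
      ("mod(k)".toList :: s.1, none)
    else (p :: s.1, some tok)
  | none => (s.1, some tok)

-- flush the pending token and restore order
def pvFlushB (s : List (List Char) × Option (List Char)) : List (List Char) :=
  match s.2 with
  | some p => (p :: s.1).reverse
  | none => s.1.reverse

-- pass 2: format one merged token independently
def pvFmtB (tok : List Char) : List Char :=
  if PySem.Chars.endswith tok "(k)".toList then tok
  else if tok = "ca".toList ∨ tok = "io".toList then PySem.Chars.upper tok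
  else pvCapitalize tok

def format_family_label_py_alt (name : String) : String :=
  let tokens := PySem.Chars.split₀
    (PySem.Chars.replace (PySem.Chars.strip name.toList) "_".toList " ".toList)
  if tokens = [] then "Unknown"
  else String.ofList (PySem.Chars.join " ".toList
    ((pvFlushB (tokens.foldl pvStepB ([], none))).map pvFmtB))

-- ===== PRECONDITION & SPEC =====
def Spec_format_family_label_py (name : String) (out : String) : Prop := out = format_family_label_py_alt name
instance (name : String) (out : String) : Decidable (Spec_format_family_label_py name out) := by unfold Spec_format_family_label_py; infer_instance

-- ===== CLAIM (what is proved, stated in full; the proofs are below) =====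
def Claim_equal_format_family_label_py : Prop := ∀ (name : String), Dom_format_family_label_py name → Spec_format_family_label_py name (format_family_label_py name)

-- ===== LEMMAS AND PROOFS =====

-- reference merge: the greedy pair-collapse as direct recursion (proof-only helper)
def pvRecMerge : List (List Char) → List (List Char)
  | [] => []
  | t :: rest =>
    match rest with
    | n :: rest' =>
      if PySem.Chars.lower t = "mod".toList ∧
          (PySem.Chars.lower n = "k".toList ∨ PySem.Chars.lower n = "(k)".toList) then
        "mod(k)".toList :: pvRecMerge rest'
      else PySem.Chars.lower t :: pvRecMerge (n :: rest')
    | [] => [PySem.Chars.lower t]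

-- B's fold computes the reference merge (generalized over accumulator and pending state)
theorem pvFold_eq_recMerge (ts : List (List Char)) :
    ∀ (acc : List (List Char)) (p : Option (List Char)),
      pvFlushB (ts.foldl pvStepB (acc, p.map PySem.Chars.lower)) =
        acc.reverse ++ pvRecMerge ((p.toList) ++ ts) := by
  induction ts with
  | nil =>
    intro acc p
    cases p <;> simp [pvFlushB, pvRecMerge]
  | cons n rest ih =>
    intro acc p
    cases p with
    | none =>
      have := ih acc (some n)
      simpa [List.foldl, pvStepB] using this
    | some t =>
      by_cases h : PySem.Chars.lower t = "mod".toList ∧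
          (PySem.Chars.lower n = "k".toList ∨ PySem.Chars.lower n = "(k)".toList)
      · have hs : pvStepB (acc, some (PySem.Chars.lower t)) n = ("mod(k)".toList :: acc, none) := by
          simp only [pvStepB]; rw [if_pos h]
        have hr : pvRecMerge (t :: n :: rest) = "mod(k)".toList :: pvRecMerge rest := by
          simp only [pvRecMerge]; rw [if_pos h]
        have key := ih ("mod(k)".toList :: acc) none
        simp only [Option.map_none, Option.toList_none, List.nil_append] at key
        simp only [Option.map_some, Option.toList_some, List.cons_append, List.nil_append,
          List.foldl, hs]
        rw [key, hr]
        simp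
      · have hs : pvStepB (acc, some (PySem.Chars.lower t)) n =
            (PySem.Chars.lower t :: acc, some (PySem.Chars.lower n)) := by
          simp only [pvStepB]; rw [if_neg h]
        have hr : pvRecMerge (t :: n :: rest) = PySem.Chars.lower t :: pvRecMerge (n :: rest) := by
          simp only [pvRecMerge]; rw [if_neg h]
        have := ih (PySem.Chars.lower t :: acc) (some n)
        simp only [Option.map_some, Option.toList_some, List.cons_append, List.nil_append,
          List.foldl, hs] at this ⊢
        rw [this, hr]
        simp

-- A's interleaved loop = reference merge followed by the per-token format map
theorem pvLoopA_eq_merge_map (ts : List (List Char)) :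
    pvLoopA ts = (pvRecMerge ts).map pvFmtB := by
  induction ts using pvLoopA.induct <;>
    simp only [pvLoopA, pvRecMerge, List.map_cons, List.map_nil] <;>
    split_ifs <;> simp_all [pvFmtB] <;> decide

-- ===== VERDICT (by name: the statement is the Claim_ definition above) =====
theorem format_family_label_py_spec : Claim_equal_format_family_label_py := by
  intro name _
  unfold Spec_format_family_label_py format_family_label_py format_family_label_py_alt
  have h := pvFold_eq_recMerge
    (PySem.Chars.split₀ (PySem.Chars.replace (PySem.Chars.strip name.toList) "_".toList " ".toList))
    [] none
  simp only [Option.map_none, Option.toList_none, List.nil_append, List.reverse_nil] at h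
  simp only [h, pvLoopA_eq_merge_map]
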